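-- pv_equiv track=rewrite | github.com/helloitsjoe/aoc-2024 | aoc/day_09.py | create_slot_map
-- ===== SOURCE A (Python) =====
-- def create_slot_map(data_list: list[int]) -> list[tuple[int, int]]:
--     slot_map = []
--     start_idx = -1
--     cap = 0
--
--     for i, block in enumerate(data_list):
--         if block == -1:
--             start_idx = i if start_idx == -1 else start_idx
--             cap += 1
--         else:
--             if start_idx != -1:
--                 slot_map.append((start_idx, cap))
--             start_idx = -1
--             cap = 0
--
--     if start_idx != -1:
--         slot_map.append((start_idx, cap))
--
--     return slot_map
-- ===== SOURCE B (Python) =====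
-- def create_slot_map(data_list: list[int]) -> list[tuple[int, int]]:
--     slot_map = []
--     i, n = 0, len(data_list)
--     while i < n:
--         if data_list[i] == -1:
--             j = i + 1
--             while j < n and data_list[j] == -1:
--                 j += 1
--             slot_map.append((i, j - i))
--             i = j
--         else:
--             i += 1
--     return slot_map
-- ===== Notes on version B (the rewrite author's own statement) =====
-- stated objective: alternative
-- what changed: Replaced A's one-pass state machine (start_idx/cap accumulators with a trailing flush after the loop) by an index-driven outer scan that, on meeting a -1, consumes the whole run with an inner scan and emits (start, length) immediately, so no open-run state or post-loop flush exists.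
import Mathlib
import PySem

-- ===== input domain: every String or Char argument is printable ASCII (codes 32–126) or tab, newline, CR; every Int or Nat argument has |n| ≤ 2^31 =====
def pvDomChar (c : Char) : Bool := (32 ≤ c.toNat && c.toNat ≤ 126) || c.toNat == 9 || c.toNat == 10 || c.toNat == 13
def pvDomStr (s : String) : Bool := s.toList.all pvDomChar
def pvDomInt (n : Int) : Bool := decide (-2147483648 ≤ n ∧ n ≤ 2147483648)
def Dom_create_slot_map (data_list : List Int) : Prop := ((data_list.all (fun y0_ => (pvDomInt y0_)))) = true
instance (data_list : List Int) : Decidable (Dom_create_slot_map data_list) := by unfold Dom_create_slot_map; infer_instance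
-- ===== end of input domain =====

-- B replaces A's start_idx/cap state machine (with trailing flush) by a run-consuming scan
-- that emits each (start, length) as soon as the run ends: an alternative decomposition, same cost.


-- ===== PORT A =====
-- the for-loop over enumerate(data_list): state (slot_map, start_idx, cap), index i
def csmLoopA : List Int → Int → List (Int × Int) → Int → Int → (List (Int × Int) × Int × Int)
  | [], _, slot_map, start_idx, cap => (slot_map, start_idx, cap)
  | block :: rest, i, slot_map, start_idx, cap =>
      if block == -1 then
        csmLoopA rest (i + 1) slot_map (if start_idx == -1 then i else start_idx) (cap + 1)
      else
        csmLoopA rest (i + 1)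
          (if start_idx != -1 then slot_map ++ [(start_idx, cap)] else slot_map) (-1) 0

def create_slot_map (data_list : List Int) : List (Int × Int) :=
  let s := csmLoopA data_list 0 [] (-1) 0
  if s.2.1 != -1 then s.1 ++ [(s.2.1, s.2.2)] else s.1

-- ===== PORT B =====
-- inner while: length of the leading run of -1s
def csmRunLen : List Int → Int
  | [] => 0
  | x :: xs => if x == -1 then 1 + csmRunLen xs else 0

-- advancing i = j past the run
def csmDropRun : List Int → List Int
  | [] => []
  | x :: xs => if x == -1 then csmDropRun xs else x :: xs

theorem csmDropRun_length_le : ∀ (l : List Int), (csmDropRun l).length ≤ l.length := by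
  intro l; induction l with
  | nil => simp [csmDropRun]
  | cons x xs ih =>
      simp only [csmDropRun]
      split
      · simp only [List.length_cons]; omega
      · simp

-- outer while over the suffix of data_list starting at index i
def csmGo : List Int → Int → List (Int × Int)
  | [], _ => []
  | x :: xs, i =>
      if x == -1 then
        (i, 1 + csmRunLen xs) :: csmGo (csmDropRun xs) (i + (1 + csmRunLen xs))
      else
        csmGo xs (i + 1)
termination_by l => l.length
decreasing_by
  · exact Nat.lt_succ_of_le (csmDropRun_length_le xs)
  · simp

def create_slot_map_alt (data_list : List Int) : List (Int × Int) :=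
  csmGo data_list 0

-- ===== PRECONDITION & SPEC =====
def Spec_create_slot_map (data_list : List Int) (out : List (Int × Int)) : Prop := out = create_slot_map_alt data_list
instance (data_list : List Int) (out : List (Int × Int)) : Decidable (Spec_create_slot_map data_list out) := by unfold Spec_create_slot_map; infer_instance

-- ===== CLAIM (what is proved, stated in full; the proofs are below) =====
def Claim_equal_create_slot_map : Prop := ∀ (data_list : List Int), Dom_create_slot_map data_list → Spec_create_slot_map data_list (create_slot_map data_list)

-- ===== LEMMAS AND PROOFS =====

-- A's loop followed by the trailing flush, starting from an arbitrary state
def csmFlushA (l : List Int) (i : Int) (sm : List (Int × Int)) (si cap : Int) : List (Int × Int) :=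
  let s := csmLoopA l i sm si cap
  if s.2.1 != -1 then s.1 ++ [(s.2.1, s.2.2)] else s.1

-- Invariant, proved mutually on l: from a closed state A's flushed loop is sm ++ csmGo l i,
-- and from an open state (si ≠ -1, cap accumulated so far) it extends the open run first.
theorem csmMain : ∀ (l : List Int),
    (∀ (i : Int) (sm : List (Int × Int)), 0 ≤ i → csmFlushA l i sm (-1) 0 = sm ++ csmGo l i) ∧
    (∀ (i : Int) (sm : List (Int × Int)) (si cap : Int), 0 ≤ i → si ≠ -1 →
      csmFlushA l i sm si cap =
        sm ++ ((si, cap + csmRunLen l) :: csmGo (csmDropRun l) (i + csmRunLen l))) := by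
  intro l
  induction l with
  | nil =>
      constructor
      · intro i sm _; simp [csmFlushA, csmLoopA, csmGo]
      · intro i sm si cap _ hsi
        simp only [csmFlushA, csmLoopA, csmRunLen, csmDropRun, csmGo]
        have : (si != -1) = true := by simpa using hsi
        simp [this]
  | cons x xs ih =>
      obtain ⟨ihc, iho⟩ := ih
      constructor
      · intro i sm hi
        by_cases hx : x = -1
        · have h1 : csmFlushA (x :: xs) i sm (-1) 0 = csmFlushA xs (i + 1) sm i 1 := by
            simp [csmFlushA, csmLoopA, hx]
          rw [h1, iho (i + 1) sm i 1 (by omega) (by omega)]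
          have hxb : (x == -1) = true := by simpa using hx
          simp only [csmGo, hxb, if_true]
          ring_nf
        · have h1 : csmFlushA (x :: xs) i sm (-1) 0 = csmFlushA xs (i + 1) sm (-1) 0 := by
            simp [csmFlushA, csmLoopA, hx]
          rw [h1, ihc (i + 1) sm (by omega)]
          have : (x == -1) = false := by simpa using hx
          simp [csmGo, this]
      · intro i sm si cap hi hsi
        by_cases hx : x = -1
        · have hs : (si == -1) = false := by simpa using hsi
          have h1 : csmFlushA (x :: xs) i sm si cap = csmFlushA xs (i + 1) sm si (cap + 1) := by
            simp [csmFlushA, csmLoopA, hx, hs]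
          rw [h1, iho (i + 1) sm si (cap + 1) (by omega) hsi]
          have hxb : (x == -1) = true := by simpa using hx
          simp only [csmRunLen, csmDropRun, hxb, if_true]
          ring_nf
        · have hs : (si != -1) = true := by simpa using hsi
          have h1 : csmFlushA (x :: xs) i sm si cap =
              csmFlushA xs (i + 1) (sm ++ [(si, cap)]) (-1) 0 := by
            simp [csmFlushA, csmLoopA, hx, hs]
          rw [h1, ihc (i + 1) (sm ++ [(si, cap)]) (by omega)]
          have hxb : (x == -1) = false := by simpa using hx
          simp [csmRunLen, csmDropRun, hxb, csmGo]

-- ===== VERDICT (by name: the statement is the Claim_ definition above) =====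
theorem create_slot_map_spec : Claim_equal_create_slot_map := by
  intro data_list _
  unfold Spec_create_slot_map create_slot_map create_slot_map_alt
  exact (csmMain data_list).1 0 [] le_rfl
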